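-- pv_equiv track=rewrite | github.com/RowanMoon/AdventOfCode2020 | Day 6/Code.py | processLine2
-- ===== SOURCE A (Python) =====
-- def processLine2(b):
--     out = ""
--     out2 = ""
--     xLen = len(b)
--     for i in b:
--         out = out + i
--     for i in out:
--         if out.count(i) == xLen:
--             out2 = out2 + i
--     return set(out2)
-- ===== SOURCE B (Python) =====
-- def processLine2(b):
--     out = "".join(b)
--     srt = sorted(out)
--     runlen = {}
--     i = 0
--     n = len(srt)
--     while i < n:
--         j = i
--         while j < n and srt[j] == srt[i]:
--             j += 1
--         runlen[srt[i]] = j - i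
--         i = j
--     res = set()
--     for ch in out:
--         if runlen.get(ch) == len(b):
--             res.add(ch)
--     return res
-- ===== Notes on version B (the rewrite author's own statement) =====
-- stated objective: faster
-- what changed: Sort the concatenation once and read each character's total count off the length of its run (two-index run scan), instead of rescanning the whole concatenation with out.count() for every character.
import Mathlib
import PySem

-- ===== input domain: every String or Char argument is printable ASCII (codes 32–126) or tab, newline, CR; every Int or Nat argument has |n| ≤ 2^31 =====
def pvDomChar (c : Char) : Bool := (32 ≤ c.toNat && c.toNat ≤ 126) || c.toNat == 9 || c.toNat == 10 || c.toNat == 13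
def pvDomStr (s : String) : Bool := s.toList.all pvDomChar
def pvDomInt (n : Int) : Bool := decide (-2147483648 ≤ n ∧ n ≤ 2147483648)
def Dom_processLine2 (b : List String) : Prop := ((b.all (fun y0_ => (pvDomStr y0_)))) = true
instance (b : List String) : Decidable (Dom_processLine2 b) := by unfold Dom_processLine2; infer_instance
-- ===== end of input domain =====

-- B replaces A's per-character out.count() rescans of the concatenation by sorting the
-- concatenation once and reading each character's total count off the length of its run.

-- ===== PORT A =====
-- strings are handled on their code-point lists (PySem.Chars convention); out.count(i) for the
-- single character i is PySem.List.count on the concatenated character list (exact).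
def processLine2 (b : List String) : List String :=
  let xLen : Int := (b.length : Int)
  let out : List Char := b.foldl (fun acc i => acc ++ i.toList) []
  let out2 : List Char :=
    out.foldl (fun acc i => if (PySem.List.count out i : Int) == xLen then acc ++ [i] else acc) []
  (PySem.Set.ofList out2).map (fun c => String.ofList [c])

-- ===== PORT B =====
-- the outer while loop of Source B, one step per run: the inner 'while srt[j] == srt[i]' scan is the
-- takeWhile/dropWhile split of the rest, and 'runlen[srt[i]] = j - i' the dict insert (exact)
def pvRunsDict (l : List Char) (d : PySem.Dict Char Int) : PySem.Dict Char Int :=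
  match l with
  | [] => d
  | c :: rest =>
      pvRunsDict (rest.dropWhile (fun x => x == c))
        (d.insert c (1 + ((rest.takeWhile (fun x => x == c)).length : Int)))
termination_by l.length
decreasing_by
  exact Nat.lt_succ_of_le (List.length_dropWhile_le _ _)

def processLine2_alt (b : List String) : List String :=
  let out : List Char := List.intercalate [] (b.map String.toList)   -- "".join(b)
  let srt : List Char := PySem.List.sorted out (fun c => c) false    -- sorted(out)
  let runlen : PySem.Dict Char Int := pvRunsDict srt PySem.Dict.empty
  out.foldl
    (fun res ch =>
      if runlen.get? ch == some ((b.length : Int)) then PySem.Set.add res (String.ofList [ch]) else res)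
    PySem.Set.empty

-- ===== PRECONDITION & SPEC =====
def Spec_processLine2 (b : List String) (out : List String) : Prop := out = processLine2_alt b
instance (b : List String) (out : List String) : Decidable (Spec_processLine2 b out) := by unfold Spec_processLine2; infer_instance

-- ===== CLAIM (what is proved, stated in full; the proofs are below) =====
def Claim_equal_processLine2 : Prop := ∀ (b : List String), Dom_processLine2 b → Spec_processLine2 b (processLine2 b)

-- ===== LEMMAS AND PROOFS =====

-- ''.join as flatMap
lemma pvJoin_eq (b : List String) :
    List.intercalate [] (b.map String.toList) = b.flatMap String.toList := by
  simp only [List.intercalate]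
  induction b with
  | nil => rfl
  | cons x xs ih => cases xs <;> simp_all

-- run lengths of a sorted list are total counts (first-match dict lookup)
lemma pvRunsDict_get? (l : List Char) (d : PySem.Dict Char Int)
    (h : l.Pairwise (· ≤ ·)) (ch : Char) :
    (pvRunsDict l d).get? ch =
      if ch ∈ l then some ((l.count ch : Int)) else d.get? ch := by
  induction l, d using pvRunsDict.induct with
  | case1 => simp [pvRunsDict]
  | case2 d c rest ih =>
    have hle : ∀ x ∈ rest, c ≤ x := fun x hx => (List.pairwise_cons.mp h).1 x hx
    have hrest : rest.Pairwise (· ≤ ·) := (List.pairwise_cons.mp h).2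
    have hsplit := (List.takeWhile_append_dropWhile (p := fun x => x == c) (l := rest)).symm
    have htw : ∀ x ∈ rest.takeWhile (fun x => x == c), x = c := by
      intro x hx
      simpa using List.mem_takeWhile_imp hx
    have hcnd : c ∉ rest.dropWhile (fun x => x == c) := by
      intro hc
      cases hd : rest.dropWhile (fun x => x == c) with
      | nil => simp [hd] at hc
      | cons y ys =>
        have hyne : ¬ (y == c) = true := by
          have := List.head?_dropWhile_not (p := fun x => x == c) (l := rest)
          simp [hd] at this
          simpa using this
        have hymem : y ∈ rest := by
          have : y ∈ rest.dropWhile (fun x => x == c) := by simp [hd]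
          exact (List.dropWhile_sublist _).subset this
        have hcy : c ≤ y := hle y hymem
        have hyc : y ≤ c := by
          rw [hd] at hc
          have hdp : (rest.dropWhile (fun x => x == c)).Pairwise (· ≤ ·) :=
            hrest.sublist (List.dropWhile_sublist _)
          rw [hd] at hdp
          rcases List.mem_cons.mp hc with rfl | hcys
          · exact le_refl _
          · exact (List.pairwise_cons.mp hdp).1 c hcys
        have : y = c := le_antisymm hyc hcy
        exact hyne (by simp [this])
    have hdrop : (rest.dropWhile (fun x => x == c)).Pairwise (· ≤ ·) :=
      hrest.sublist (List.dropWhile_sublist _)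
    rw [pvRunsDict, ih hdrop]
    by_cases hchc : ch = c
    · subst hchc
      have hsp := congrArg (List.count ch) hsplit
      rw [List.count_append] at hsp
      have h1 : (rest.takeWhile (fun x => x == ch)).count ch
          = (rest.takeWhile (fun x => x == ch)).length :=
        List.count_eq_length.mpr (fun y hy => by simp [htw y hy])
      have h2 : (rest.dropWhile (fun x => x == ch)).count ch = 0 :=
        List.count_eq_zero.mpr hcnd
      simp [hcnd, PySem.Dict.get?_insert_self, List.count_cons_self]
      omega
    · have hcount : (c :: rest).count ch = (rest.dropWhile (fun x => x == c)).count ch := by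
        have hcc : List.count ch (c :: rest) = List.count ch rest := by
          have hcs : ¬ c = ch := fun hh => hchc hh.symm
          simp [hcs]
        rw [hcc]
        have hsp := congrArg (List.count ch) hsplit
        rw [List.count_append] at hsp
        have h1 : (rest.takeWhile (fun x => x == c)).count ch = 0 :=
          List.count_eq_zero.mpr (fun hc => hchc (htw ch hc))
        omega
      by_cases hmem : ch ∈ rest.dropWhile (fun x => x == c)
      · have hr : ch ∈ rest := (List.dropWhile_sublist _).subset hmem
        simp [hmem, hcount, hr]
      · have hnm : ch ∉ (c :: rest) := by
          intro hc
          rcases List.mem_cons.mp hc with rfl | hcr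
          · exact hchc rfl
          · rcases List.mem_append.mp (hsplit ▸ hcr : ch ∈ _) with htk | hdw
            · exact hchc (htw ch htk)
            · exact hmem hdw
        simp [hmem, hnm, PySem.Dict.get?_insert_of_ne _ _ hchc]

-- conditional set-building fold as update with the filtered, mapped list
lemma pvFoldlAddIf {α β : Type} [BEq β] (p : α → Bool) (f : α → β) (l : List α) (s : PySem.Set β) :
    l.foldl (fun s x => if p x then PySem.Set.add s (f x) else s) s =
      PySem.Set.update s ((l.filter p).map f) := by
  induction l generalizing s with
  | nil => rfl
  | cons x xs ih =>
    by_cases hp : p x <;> simp [hp, ih, PySem.Set.update]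

-- set() commutes with mapping an injective function
lemma pvOfListMapInj {α β : Type} [BEq α] [LawfulBEq α] [BEq β] [LawfulBEq β]
    (f : α → β) (hf : Function.Injective f) (l : List α) :
    PySem.Set.ofList (l.map f) = (PySem.Set.ofList l).map f := by
  induction l using List.reverseRecOn with
  | nil => rfl
  | append_singleton xs x ih =>
    rw [List.map_append, List.map_singleton, PySem.Set.ofList_eq_foldl,
      PySem.Set.ofList_eq_foldl, List.foldl_append, List.foldl_append,
      ← PySem.Set.ofList_eq_foldl, ← PySem.Set.ofList_eq_foldl]
    simp only [List.foldl_cons, List.foldl_nil]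
    rw [ih]
    unfold PySem.Set.add
    by_cases hmem : x ∈ xs <;>
      simp [PySem.Set.mem_ofList, hmem, hf.eq_iff, List.mem_map]

-- ===== VERDICT (by name: the statement is the Claim_ definition above) =====
theorem processLine2_spec : Claim_equal_processLine2 := by
  intro b _
  unfold Spec_processLine2 processLine2 processLine2_alt
  simp only [PySem.List.foldl_append_eq_flatMap, List.nil_append, pvJoin_eq,
    PySem.List.foldl_append_if, PySem.List.count_eq]
  rw [pvFoldlAddIf, PySem.Set.update_empty, List.map_id_fun',
    ← pvOfListMapInj _ (fun a c h => by simpa using congrArg String.toList h)]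
  congr 1
  simp only [id]
  congr 1
  apply List.filter_congr
  intro ch hch
  have hps : ch ∈ PySem.List.sorted (b.flatMap String.toList) (fun c => c) false :=
    (PySem.List.mem_sorted _ _ _ _).mpr hch
  rw [pvRunsDict_get? _ _ (by simpa using PySem.List.sorted_pairwise (b.flatMap String.toList) (fun c => c)) ch]
  simp [hps, ((PySem.List.sorted_perm (b.flatMap String.toList) (fun c => c) false).count_eq ch)]
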